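-- pv_equiv track=rewrite | github.com/weekstudy/fucking_the_algorithm | test61_ContinousCards.py | is_continus
-- ===== SOURCE A (Python) =====
-- def is_continus(numbers: list):
--     if len(numbers) < 1:
--         return False
--     numbers.sort()
--     length = len(numbers)
--     # 统计0的个数
--     count_zero = numbers.count(0)
--
--     # 统计空缺的个数
--     count_blank = 0
--     for i in range(count_zero, length - 1):
--         if numbers[i + 1] == numbers[i]:
--             return False
--         elif numbers[i + 1] - numbers[i] > 1:
--             count_blank += numbers[i + 1] - numbers[i] - 1
--
--     if count_zero >= count_blank:
--         return True
--     else: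
--         return False
-- ===== SOURCE B (Python) =====
-- def is_continus(numbers: list):
--     if len(numbers) < 1:
--         return False
--     numbers.sort()
--     count_zero = numbers.count(0)
--     tail = numbers[count_zero:]
--     if len(set(tail)) != len(tail):
--         return False
--     if not tail:
--         return True
--     return count_zero >= (tail[-1] - tail[0]) - (len(tail) - 1)
-- ===== Notes on version B (the rewrite author's own statement) =====
-- stated objective: simpler
-- what changed: A's adjacent-gap accumulation loop with in-loop duplicate test is replaced by a set-based duplicate check plus the closed form (tail[-1]-tail[0])-(len(tail)-1) for the number of blanks.
import Mathlib
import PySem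

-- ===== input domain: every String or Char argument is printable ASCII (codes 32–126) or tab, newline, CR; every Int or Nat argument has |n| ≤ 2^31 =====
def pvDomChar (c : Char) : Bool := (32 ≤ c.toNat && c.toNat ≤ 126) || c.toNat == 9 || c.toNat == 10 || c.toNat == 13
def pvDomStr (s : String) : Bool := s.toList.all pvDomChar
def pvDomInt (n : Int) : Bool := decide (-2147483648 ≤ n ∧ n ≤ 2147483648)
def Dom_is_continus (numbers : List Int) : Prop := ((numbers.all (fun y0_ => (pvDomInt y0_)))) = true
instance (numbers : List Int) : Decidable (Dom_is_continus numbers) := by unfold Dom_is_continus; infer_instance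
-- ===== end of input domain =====

-- B replaces A's adjacent-gap accumulation loop by a duplicate check plus the closed form
-- (tail[-1] - tail[0]) - (len(tail) - 1); equivalence is about the RETURN value only (both
-- A and B sort the argument in place).

-- ===== PORT A =====
-- A's loop 'for i in range(count_zero, length-1)' compares numbers[i+1] with numbers[i]:
-- exactly the adjacent pairs of numbers[count_zero:], ported as structural recursion on
-- that suffix; 'return False' inside the loop is the 'none' result.
def isContinusLoopA : List Int → Int → Option Int
  | x :: y :: rest, acc =>
      if y == x then none
      else if y - x > 1 then isContinusLoopA (y :: rest) (acc + (y - x - 1))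
      else isContinusLoopA (y :: rest) acc
  | _, acc => some acc

def is_continus (numbers : List Int) : Bool :=
  if numbers.length < 1 then false
  else
    let s := PySem.List.sorted numbers (fun x => x) false
    let count_zero := PySem.List.count s 0
    match isContinusLoopA (s.drop count_zero) 0 with
    | none => false
    | some count_blank => decide ((count_zero : Int) ≥ count_blank)

-- ===== PORT B =====
def is_continus_alt (numbers : List Int) : Bool :=
  if numbers.length < 1 then false
  else
    let s := PySem.List.sorted numbers (fun x => x) false
    let count_zero := PySem.List.count s 0
    let tail := PySem.List.slice s (some (count_zero : Int)) none
    if (PySem.Set.ofList tail).length ≠ tail.length then false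
    else
      match tail with
      | [] => true
      | x :: rest => decide ((count_zero : Int) ≥ (rest.getLastD x - x) - ((rest.length : Int) + 1 - 1))

-- ===== PRECONDITION & SPEC =====
def Spec_is_continus (numbers : List Int) (out : Bool) : Prop := out = is_continus_alt numbers
instance (numbers : List Int) (out : Bool) : Decidable (Spec_is_continus numbers out) := by unfold Spec_is_continus; infer_instance

-- ===== CLAIM (what is proved, stated in full; the proofs are below) =====
def Claim_equal_is_continus : Prop := ∀ (numbers : List Int), Dom_is_continus numbers → Spec_is_continus numbers (is_continus numbers)

-- ===== LEMMAS AND PROOFS =====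

-- set(t) has as many elements as t iff t has no duplicates
theorem ofList_length_eq_iff_nodup (t : List Int) :
    (PySem.Set.ofList t).length = t.length ↔ t.Nodup := by
  constructor
  · intro h
    have hto : (PySem.Set.ofList t).toFinset = t.toFinset := by
      ext x; simp [List.mem_toFinset, PySem.Set.mem_ofList]
    have hcard : t.toFinset.card = t.length := by
      rw [← hto, List.toFinset_card_of_nodup (PySem.Set.nodup_ofList t), h]
    have := Multiset.toFinset_card_eq_card_iff_nodup (m := (t : Multiset Int))
    simpa using this.1 (by simpa using hcard)
  · intro h
    rw [PySem.Set.ofList_eq_self_of_nodup t h]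

-- on a ≤-sorted list: A's loop returns none exactly on a duplicate, otherwise
-- acc plus the closed-form gap sum last - head - (len - 1)
theorem loopA_closed (t : List Int) (x acc : Int)
    (hp : (x :: t).Pairwise (· ≤ ·)) :
    isContinusLoopA (x :: t) acc =
      if (x :: t).Nodup then some (acc + ((t.getLastD x - x) - (t.length : Int))) else none := by
  induction t generalizing x acc with
  | nil => simp [isContinusLoopA]
  | cons y rest ih =>
    have hxy : x ≤ y := (List.pairwise_cons.1 hp).1 y (by simp)
    have hp' : (y :: rest).Pairwise (· ≤ ·) := (List.pairwise_cons.1 hp).2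
    by_cases hxe : y = x
    · subst hxe
      simp [isContinusLoopA, List.nodup_cons]
    · have hlt : x < y := lt_of_le_of_ne hxy (fun h => hxe h.symm)
      have hxnot : x ∉ y :: rest := by
        intro hmem
        rcases List.mem_cons.1 hmem with h | h
        · omega
        · have := (List.pairwise_cons.1 hp').1 x h
          omega
      have hnodup : (x :: y :: rest).Nodup ↔ (y :: rest).Nodup := by
        simp [List.nodup_cons, hxnot]
      have hbeq : (y == x) = false := by simp [hxe]
      have hacc : (if y - x > 1 then acc + (y - x - 1) else acc) = acc + (y - x - 1) := by
        split <;> omega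
      rw [show isContinusLoopA (x :: y :: rest) acc
            = isContinusLoopA (y :: rest) (if y - x > 1 then acc + (y - x - 1) else acc) by
          by_cases h1 : y - x > 1 <;> simp [isContinusLoopA, hbeq, h1]]
      rw [hacc, ih y (acc + (y - x - 1)) hp']
      by_cases hn : (y :: rest).Nodup
      · simp only [hn, if_pos, hnodup.2 hn, if_pos]
        congr 1
        cases rest with
        | nil => simp [List.getLastD]
        | cons z zs =>
          simp only [List.getLastD_cons, List.length_cons]
          push_cast
          ring
      · simp [hn]

theorem is_continus_eq (numbers : List Int) : is_continus numbers = is_continus_alt numbers := by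
  unfold is_continus is_continus_alt
  by_cases hempty : numbers.length < 1
  · simp [hempty]
  · simp only [hempty, if_false]
    set s := PySem.List.sorted numbers (fun x => x) false with hs
    set cz := PySem.List.count s 0 with hcz
    have hslice : PySem.List.slice s (some (cz : Int)) none = s.drop cz :=
      PySem.List.slice_from_natCast s cz
    rw [hslice]
    have hsp : s.Pairwise (· ≤ ·) := by
      simpa using PySem.List.sorted_pairwise numbers (fun x => x)
    have htp : (s.drop cz).Pairwise (· ≤ ·) := List.Pairwise.drop hsp
    cases htail : s.drop cz with
    | nil => simp [isContinusLoopA, PySem.Set.ofList]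
    | cons x rest =>
      rw [htail] at htp
      rw [loopA_closed rest x 0 htp]
      by_cases hn : (x :: rest).Nodup
      · have hlen : (PySem.Set.ofList (x :: rest)).length = (x :: rest).length :=
          (ofList_length_eq_iff_nodup _).2 hn
        simp only [hn, if_pos, hlen, ne_eq, not_true_eq_false, if_false]
        have h2 : (0 : Int) + (rest.getLastD x - x - (rest.length : Int))
            = (rest.getLastD x - x) - ((rest.length : Int) + 1 - 1) := by ring
        rw [h2]
      · have hlen : (PySem.Set.ofList (x :: rest)).length ≠ (x :: rest).length :=
          fun h => hn ((ofList_length_eq_iff_nodup _).1 h)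
        rw [if_neg hn, if_pos hlen]

-- ===== VERDICT (by name: the statement is the Claim_ definition above) =====
theorem is_continus_spec : Claim_equal_is_continus := by
  intro numbers _
  unfold Spec_is_continus
  exact is_continus_eq numbers
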